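-- pv_equiv track=rewrite | github.com/Tinkerforge/esp32-firmware | software/src/modules/heating/tests/plan.py | _get_control_period_blocks
-- ===== SOURCE A (Python) =====
-- def _get_control_period_blocks(
--     duration_hours: int,
--     first_date: int,
--     resolution_minutes: int,
--     num_prices: int,
--     tz_offset_minutes: int = 0,
-- ) -> list:
--     """Compute control period block boundaries, matching firmware logic."""
--     slots_per_hour = 60 // resolution_minutes
--     slots_per_period = duration_hours * slots_per_hour
--     duration_minutes = duration_hours * 60
--
--     local_first_date = first_date + tz_offset_minutes
--     minutes_since_midnight = local_first_date % 1440
--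
--     block_offset = (minutes_since_midnight // duration_minutes) * duration_minutes
--     first_block_start_minutes = first_date - (minutes_since_midnight - block_offset)
--
--     price_end_minutes = first_date + num_prices * resolution_minutes
--
--     blocks = []
--     block_start = first_block_start_minutes
--     while block_start < price_end_minutes:
--         block_start_index = (block_start - first_date) // resolution_minutes
--         block_end_index = block_start_index + slots_per_period
--         if block_start_index >= 0 and block_end_index <= num_prices:
--             blocks.append((block_start_index, slots_per_period))
--         block_start += duration_minutes
--
--     return blocks
-- ===== SOURCE B (Python) =====
-- def _get_control_period_blocks(
--     duration_hours: int,
--     first_date: int,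
--     resolution_minutes: int,
--     num_prices: int,
--     tz_offset_minutes: int = 0,
-- ) -> list:
--     """Closed-form block boundaries: derive the valid block-index range directly
--     instead of scanning every candidate block with a skip branch."""
--     slots_per_period = duration_hours * (60 // resolution_minutes)
--     duration_minutes = duration_hours * 60
--     minutes_since_midnight = (first_date + tz_offset_minutes) % 1440
--     # offset of the first candidate block relative to first_date, in (-duration_minutes, 0]
--     c = (minutes_since_midnight // duration_minutes) * duration_minutes - minutes_since_midnight
--     # number of candidate blocks the firmware scan would inspect
--     n = max(0, -((c - num_prices * resolution_minutes) // duration_minutes))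
--     # first k whose block starts at or after first_date
--     k_lo = max(0, -(c // duration_minutes))
--     # one past the last k whose block still fits inside the price window
--     k_hi = min(n, 1 + (resolution_minutes * (num_prices - slots_per_period + 1) - 1 - c) // duration_minutes)
--     return [((c + k * duration_minutes) // resolution_minutes, slots_per_period)
--             for k in range(k_lo, k_hi)]
-- ===== Notes on version B (the rewrite author's own statement) =====
-- stated objective: alternative
-- what changed: Replaces the while-loop scan over every candidate block (with a per-iteration fit check) by a closed-form computation of the valid block range [k_lo, k_hi) via ceiling/floor divisions, emitting the blocks directly with no skip branch.
-- outside the precondition, e.g. on _get_control_period_blocks(4, 1634, -2, 50, -23): A returns [(85, -120)], B returns []; on _get_control_period_blocks(-1, 100, 15, 0, 0): A returns [], B returns []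
import Mathlib
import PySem

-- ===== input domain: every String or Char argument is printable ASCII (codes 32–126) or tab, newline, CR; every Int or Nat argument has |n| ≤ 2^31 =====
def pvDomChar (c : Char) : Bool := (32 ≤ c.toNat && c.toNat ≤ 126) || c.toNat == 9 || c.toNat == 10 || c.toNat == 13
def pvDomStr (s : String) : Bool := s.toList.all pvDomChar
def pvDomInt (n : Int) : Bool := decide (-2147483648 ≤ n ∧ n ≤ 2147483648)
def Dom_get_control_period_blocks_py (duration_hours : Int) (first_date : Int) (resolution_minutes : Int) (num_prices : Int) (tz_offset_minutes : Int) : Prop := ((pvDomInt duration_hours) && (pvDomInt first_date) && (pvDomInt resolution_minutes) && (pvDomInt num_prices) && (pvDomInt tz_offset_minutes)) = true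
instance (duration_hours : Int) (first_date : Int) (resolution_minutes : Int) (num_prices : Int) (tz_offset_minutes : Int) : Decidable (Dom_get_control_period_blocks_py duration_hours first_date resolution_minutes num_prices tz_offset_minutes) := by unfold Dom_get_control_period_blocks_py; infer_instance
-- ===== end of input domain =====

-- B replaces A's while-loop scan over candidate blocks (with a per-iteration fit check)
-- by a closed-form computation of the valid block-index range; return values agree on Pre_.


-- ===== PORT A =====
-- A's while loop, with fuel only to make it total (the fuel given below always suffices on Pre_)
def pvLoopA (fd r N SPP DM pe : Int) (bs : Int) : Nat → List (Int × Int)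
  | 0 => []
  | fuel + 1 =>
    if bs < pe then
      (let idx := PySem.Int.floordiv (bs - fd) r
       if 0 ≤ idx ∧ idx + SPP ≤ N then [(idx, SPP)] else []) ++
      pvLoopA fd r N SPP DM pe (bs + DM) fuel
    else []

def get_control_period_blocks_py (duration_hours : Int) (first_date : Int) (resolution_minutes : Int) (num_prices : Int) (tz_offset_minutes : Int) : List (Int × Int) :=
  let slots_per_hour := PySem.Int.floordiv 60 resolution_minutes
  let slots_per_period := duration_hours * slots_per_hour
  let duration_minutes := duration_hours * 60
  let local_first_date := first_date + tz_offset_minutes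
  let minutes_since_midnight := PySem.Int.mod local_first_date 1440
  let block_offset := (PySem.Int.floordiv minutes_since_midnight duration_minutes) * duration_minutes
  let first_block_start_minutes := first_date - (minutes_since_midnight - block_offset)
  let price_end_minutes := first_date + num_prices * resolution_minutes
  pvLoopA first_date resolution_minutes num_prices slots_per_period duration_minutes price_end_minutes first_block_start_minutes ((price_end_minutes - first_block_start_minutes).toNat + 1)

-- ===== PORT B =====
def get_control_period_blocks_py_alt (duration_hours : Int) (first_date : Int) (resolution_minutes : Int) (num_prices : Int) (tz_offset_minutes : Int) : List (Int × Int) :=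
  let slots_per_period := duration_hours * (PySem.Int.floordiv 60 resolution_minutes)
  let duration_minutes := duration_hours * 60
  let minutes_since_midnight := PySem.Int.mod (first_date + tz_offset_minutes) 1440
  let c := (PySem.Int.floordiv minutes_since_midnight duration_minutes) * duration_minutes - minutes_since_midnight
  let n := max 0 (-(PySem.Int.floordiv (c - num_prices * resolution_minutes) duration_minutes))
  let k_lo := max 0 (-(PySem.Int.floordiv c duration_minutes))
  let k_hi := min n (1 + PySem.Int.floordiv (resolution_minutes * (num_prices - slots_per_period + 1) - 1 - c) duration_minutes)
  (PySem.List.pyRange k_lo k_hi 1).map (fun k => (PySem.Int.floordiv (c + k * duration_minutes) resolution_minutes, slots_per_period))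

-- ===== PRECONDITION & SPEC =====
-- Pre_ restricts to the natural domain: a positive slot resolution and a positive block duration.
-- Outside it A raises ZeroDivisionError (resolution 0 or duration 0), loops forever (negative
-- duration with blocks before the price window's end), or floor-divides by a negative slot width.
def Pre_get_control_period_blocks_py (duration_hours : Int) (first_date : Int) (resolution_minutes : Int) (num_prices : Int) (tz_offset_minutes : Int) : Prop :=
  1 ≤ duration_hours ∧ 1 ≤ resolution_minutes
instance (duration_hours : Int) (first_date : Int) (resolution_minutes : Int) (num_prices : Int) (tz_offset_minutes : Int) : Decidable (Pre_get_control_period_blocks_py duration_hours first_date resolution_minutes num_prices tz_offset_minutes) := by unfold Pre_get_control_period_blocks_py; infer_instance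

def pvWitness_get_control_period_blocks_py : Int × Int × Int × Int × Int := (1, 0, 15, 4, 0)

def Spec_get_control_period_blocks_py (duration_hours : Int) (first_date : Int) (resolution_minutes : Int) (num_prices : Int) (tz_offset_minutes : Int) (out : List (Int × Int)) : Prop := out = get_control_period_blocks_py_alt duration_hours first_date resolution_minutes num_prices tz_offset_minutes
instance (duration_hours : Int) (first_date : Int) (resolution_minutes : Int) (num_prices : Int) (tz_offset_minutes : Int) (out : List (Int × Int)) : Decidable (Spec_get_control_period_blocks_py duration_hours first_date resolution_minutes num_prices tz_offset_minutes out) := by unfold Spec_get_control_period_blocks_py; infer_instance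

-- ===== CLAIM (what is proved, stated in full; the proofs are below) =====
def Claim_equal_get_control_period_blocks_py : Prop := ∀ (duration_hours : Int) (first_date : Int) (resolution_minutes : Int) (num_prices : Int) (tz_offset_minutes : Int), Dom_get_control_period_blocks_py duration_hours first_date resolution_minutes num_prices tz_offset_minutes → Pre_get_control_period_blocks_py duration_hours first_date resolution_minutes num_prices tz_offset_minutes → Spec_get_control_period_blocks_py duration_hours first_date resolution_minutes num_prices tz_offset_minutes (get_control_period_blocks_py duration_hours first_date resolution_minutes num_prices tz_offset_minutes)

-- ===== LEMMAS AND PROOFS =====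

-- the loop's body at candidate block k, written over the offset c = first_block_start - first_date
def pvSpec (r N SPP DM c : Int) : Nat → Int → List (Int × Int)
  | 0, _ => []
  | m + 1, k =>
      (if 0 ≤ PySem.Int.floordiv (c + k * DM) r ∧ PySem.Int.floordiv (c + k * DM) r + SPP ≤ N
       then [(PySem.Int.floordiv (c + k * DM) r, SPP)] else []) ++ pvSpec r N SPP DM c m (k + 1)

lemma pvLoopA_eq_pvSpec (fd r N SPP DM : Int) (pe c : Int) (hDM : 0 < DM) :
    ∀ (n fuel : Nat) (k : Int), n ≤ fuel →
      pe ≤ fd + c + (k + (n : Int)) * DM →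
      (n = 0 ∨ fd + c + (k + (n : Int) - 1) * DM < pe) →
      pvLoopA fd r N SPP DM pe (fd + c + k * DM) fuel = pvSpec r N SPP DM c n k := by
  intro n
  induction n with
  | zero =>
    intro fuel k _ hend _
    have hge : ¬ (fd + c + k * DM < pe) := by
      rw [show k + ((0 : Nat) : Int) = k from by push_cast; ring] at hend
      omega
    cases fuel with
    | zero => rfl
    | succ f => simp only [pvLoopA, if_neg hge, pvSpec]
  | succ m ih =>
    intro fuel k hfuel hend hlast
    obtain ⟨f, rfl⟩ : ∃ f, fuel = f + 1 := ⟨fuel - 1, by omega⟩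
    have hlast' : fd + c + (k + (m : Int)) * DM < pe := by
      rcases hlast with h | h
      · omega
      · push_cast at h
        rw [show k + ((m : Int) + 1) - 1 = k + (m : Int) from by ring] at h
        exact h
    have hlt : fd + c + k * DM < pe := by nlinarith [Int.natCast_nonneg m]
    simp only [pvLoopA, if_pos hlt, pvSpec]
    congr 1
    · have : fd + c + k * DM - fd = c + k * DM := by ring
      rw [this]
    · have hbs : fd + c + k * DM + DM = fd + c + (k + 1) * DM := by ring
      rw [hbs]
      apply ih f (k + 1) (by omega)
      · have : (k + 1 + (m : Int)) = k + ((m : Int) + 1) := by ring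
        rw [this]
        push_cast at hend ⊢
        exact hend
      · rcases Nat.eq_zero_or_pos m with h0 | hpos
        · left; exact h0
        · right
          have : (k + 1 + (m : Int) - 1) = k + (m : Int) := by ring
          rw [this]
          exact hlast'


lemma pvSpec_eq_filter (r N SPP DM c : Int) :
    ∀ (n : Nat) (k : Int),
      pvSpec r N SPP DM c n k =
        ((PySem.List.pyRange k (k + (n : Int)) 1).filter
            (fun j => decide (0 ≤ PySem.Int.floordiv (c + j * DM) r ∧
                              PySem.Int.floordiv (c + j * DM) r + SPP ≤ N))).map
          (fun j => (PySem.Int.floordiv (c + j * DM) r, SPP)) := by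
  intro n
  induction n with
  | zero =>
    intro k
    rw [show k + ((0 : Nat) : Int) = k by push_cast; ring, PySem.List.pyRange_one]
    simp [pvSpec]
  | succ m ih =>
    intro k
    have hlt : k < k + ((m : Int) + 1) := by have := Int.natCast_nonneg m; omega
    rw [show k + ((Nat.succ m : Nat) : Int) = k + ((m : Int) + 1) by push_cast; ring]
    rw [PySem.List.pyRange_one_cons hlt, List.filter_cons]
    simp only [pvSpec]
    by_cases hP : 0 ≤ PySem.Int.floordiv (c + k * DM) r ∧ PySem.Int.floordiv (c + k * DM) r + SPP ≤ N
    · rw [if_pos hP, if_pos (by simpa using hP), List.map_cons]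
      rw [ih (k + 1), show k + 1 + (m : Int) = k + ((m : Int) + 1) by ring]
      rfl
    · rw [if_neg hP, if_neg (by simpa using hP)]
      rw [ih (k + 1), show k + 1 + (m : Int) = k + ((m : Int) + 1) by ring]
      rfl

lemma pvGuard_iff (r N SPP DM c : Int) (hr : 0 < r) (hDM : 0 < DM) (j : Int) :
    (0 ≤ PySem.Int.floordiv (c + j * DM) r ∧ PySem.Int.floordiv (c + j * DM) r + SPP ≤ N) ↔
      (-(PySem.Int.floordiv c DM) ≤ j ∧
       j ≤ PySem.Int.floordiv (r * (N - SPP + 1) - 1 - c) DM) := by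
  have h1 : (0 ≤ PySem.Int.floordiv (c + j * DM) r) ↔ 0 ≤ c + j * DM := by
    rw [PySem.Int.le_floordiv_iff_mul_le hr]; constructor <;> intro h <;> nlinarith
  have h2 : (PySem.Int.floordiv (c + j * DM) r + SPP ≤ N) ↔ c + j * DM < (N - SPP + 1) * r := by
    constructor
    · intro h
      have := (PySem.Int.floordiv_lt_iff_lt_mul (a := c + j * DM) (q := N - SPP + 1) hr).mp (by omega)
      exact this
    · intro h
      have := (PySem.Int.floordiv_lt_iff_lt_mul (a := c + j * DM) (q := N - SPP + 1) hr).mpr h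
      omega
  have h3 : (-(PySem.Int.floordiv c DM) ≤ j) ↔ 0 ≤ c + j * DM := by
    constructor
    · intro h
      have hq : PySem.Int.floordiv c DM * DM ≤ c :=
        (PySem.Int.le_floordiv_iff_mul_le hDM).mp le_rfl
      nlinarith
    · intro h
      have : -j ≤ PySem.Int.floordiv c DM :=
        (PySem.Int.le_floordiv_iff_mul_le hDM).mpr (by nlinarith)
      omega
  have h4 : (j ≤ PySem.Int.floordiv (r * (N - SPP + 1) - 1 - c) DM) ↔ c + j * DM < (N - SPP + 1) * r := by
    rw [PySem.Int.le_floordiv_iff_mul_le hDM]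
    rw [mul_comm r (N - SPP + 1)]
    omega
  rw [h1, h2, h3, h4]

lemma pvRange_nil {a b : Int} (h : b ≤ a) : PySem.List.pyRange a b 1 = [] := by
  rw [PySem.List.pyRange_one]
  simp [Int.toNat_of_nonpos (by omega : b - a ≤ 0)]


lemma pvFilter_pyRange_interval (lo hi : Int) :
    ∀ (a b : Int),
      (PySem.List.pyRange a b 1).filter (fun j => decide (lo ≤ j ∧ j ≤ hi)) =
        PySem.List.pyRange (max a lo) (min b (hi + 1)) 1 := by
  intro a b
  generalize hm : (b - a).toNat = m
  induction m generalizing a with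
  | zero =>
    rw [pvRange_nil (by omega), pvRange_nil (by omega)]
    rfl
  | succ m ih =>
    have hab : a < b := by omega
    rw [PySem.List.pyRange_one_cons hab, List.filter_cons]
    by_cases hP : lo ≤ a ∧ a ≤ hi
    · rw [if_pos (by simpa using hP), ih (a + 1) (by omega)]
      have h1 : max (a + 1) lo = a + 1 := by omega
      have h2 : max a lo = a := by omega
      rw [h1, h2]
      exact (PySem.List.pyRange_one_cons (by omega)).symm
    · rw [if_neg (by simpa using hP), ih (a + 1) (by omega)]
      by_cases hlo : a < lo
      · congr 1
        omega
      · -- then hi < a, both ranges empty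
        rw [pvRange_nil (by omega), pvRange_nil (by omega)]

-- ===== VERDICT (by name: the statement is the Claim_ definition above) =====
theorem get_control_period_blocks_py_spec : Claim_equal_get_control_period_blocks_py := by
  intro dh fd r N tz _ hPre
  obtain ⟨hdh, hr⟩ := hPre
  unfold Spec_get_control_period_blocks_py get_control_period_blocks_py get_control_period_blocks_py_alt
  simp only []
  set SPP := dh * PySem.Int.floordiv 60 r with hSPP
  set DM := dh * 60 with hDMdef
  have hDM : 0 < DM := by omega
  have hrpos : (0 : Int) < r := by omega
  set msm := PySem.Int.mod (fd + tz) 1440 with hmsm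
  set c := PySem.Int.floordiv msm DM * DM - msm with hc
  set pe := fd + N * r with hpe
  set Mhi := PySem.Int.floordiv (r * (N - SPP + 1) - 1 - c) DM with hMhi
  set klo := -(PySem.Int.floordiv c DM) with hklo
  set n0 := -(PySem.Int.floordiv (c - N * r) DM) with hn0
  set nB := max 0 n0 with hnB
  -- F1: ceiling-division bracket for n0
  have hq1 : PySem.Int.floordiv (c - N * r) DM * DM ≤ c - N * r :=
    (PySem.Int.le_floordiv_iff_mul_le hDM).mp le_rfl
  have hq2 : c - N * r < (PySem.Int.floordiv (c - N * r) DM + 1) * DM :=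
    (PySem.Int.floordiv_lt_iff_lt_mul hDM).mp (lt_add_one _)
  have hF1a : N * r - c ≤ n0 * DM := by rw [hn0]; nlinarith
  have hF1b : (n0 - 1) * DM < N * r - c := by rw [hn0]; nlinarith
  set nN := nB.toNat with hnN
  have hnBcast : (nN : Int) = nB := Int.toNat_of_nonneg (by omega)
  have hend : pe ≤ fd + c + ((0 : Int) + (nN : Int)) * DM := by
    rw [hnBcast]
    by_cases h0 : 0 ≤ n0
    · have : nB = n0 := by omega
      rw [this]; nlinarith
    · have : nB = 0 := by omega
      rw [this]
      have : n0 * DM ≤ -DM := by nlinarith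
      nlinarith
  have hlast : nN = 0 ∨ fd + c + ((0 : Int) + (nN : Int) - 1) * DM < pe := by
    rcases Nat.eq_zero_or_pos nN with h0 | hpos
    · exact Or.inl h0
    · right
      have hnBn0 : nB = n0 := by omega
      rw [hnBcast, hnBn0]
      nlinarith
  have hfuel : nN ≤ (pe - (fd + c + (0 : Int) * DM)).toNat + 1 := by
    have hfbs : pe - (fd + c + (0 : Int) * DM) = N * r - c := by
      rw [hpe]; ring
    rw [hfbs]
    rcases Nat.eq_zero_or_pos nN with h0 | hpos
    · omega
    · have hnBn0 : nB = n0 := by omega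
      have h1 : n0 - 1 ≤ (n0 - 1) * DM := by nlinarith [show (0:Int) ≤ n0 - 1 by omega]
      omega
  have hfbs2 : fd - (msm - PySem.Int.floordiv msm DM * DM) = fd + c + (0 : Int) * DM := by
    rw [hc]; ring
  rw [hfbs2]
  rw [pvLoopA_eq_pvSpec fd r N SPP DM pe c hDM nN _ 0 hfuel hend hlast]
  rw [pvSpec_eq_filter]
  have epred : (fun j => decide (0 ≤ PySem.Int.floordiv (c + j * DM) r ∧
                    PySem.Int.floordiv (c + j * DM) r + SPP ≤ N)) =
      (fun j => decide (klo ≤ j ∧ j ≤ Mhi)) := by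
    funext j
    rw [decide_eq_decide]
    exact pvGuard_iff r N SPP DM c hrpos hDM j
  rw [epred, pvFilter_pyRange_interval, hnBcast]
  congr 2
  omega
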